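-- pv_equiv track=rewrite | github.com/fsigs/nmsu-cs516-bioinformatics-project | ps02/python/deBruijnByHash.py | create_hash_table
-- ===== SOURCE A (Python) =====
-- def create_hash_table(kmers):
--   # create one hash table by inserting both the prefix and suffix of each
--   # k-mer. The prefix and suffix is the key. Associated with each element
--   # in the hash table is the node id for that prefix or suffix in the
--   # de Bruijn graph to be constructed.
--   ht = {}
--   node_id = 0 # the node id will be used in the de Bruijn graph
--   for kmer in kmers:
--     for j in range(2): # j=0: prefix; j=1: suffix
--       key = kmer[j:len(kmer)-1+j]
--       if key not in ht:
--         ht[key] = node_id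
--         node_id += 1
--   return ht
-- ===== SOURCE B (Python) =====
-- def create_hash_table(kmers):
--   # Record each key's FIRST position in the prefix/suffix stream by overwriting
--   # across the REVERSED stream (last write wins = first occurrence), then sort
--   # the distinct keys by that position and number them 0..n-1.
--   stream = [k for kmer in kmers for k in (kmer[:-1], kmer[1:])]
--   first = {key: pos for pos, key in reversed(list(enumerate(stream)))}
--   return {key: i for i, key in enumerate(sorted(first, key=lambda k: first[k]))}
-- ===== Notes on version B (the rewrite author's own statement) =====
-- stated objective: alternative
-- what changed: B replaces A's membership-test-plus-counter loop by a different algorithm: it builds a first-position map by overwriting a dict across the REVERSED prefix/suffix stream (last write wins = first occurrence, no membership tests, no counter), then sorts the distinct keys by first position and numbers them.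
import Mathlib
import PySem

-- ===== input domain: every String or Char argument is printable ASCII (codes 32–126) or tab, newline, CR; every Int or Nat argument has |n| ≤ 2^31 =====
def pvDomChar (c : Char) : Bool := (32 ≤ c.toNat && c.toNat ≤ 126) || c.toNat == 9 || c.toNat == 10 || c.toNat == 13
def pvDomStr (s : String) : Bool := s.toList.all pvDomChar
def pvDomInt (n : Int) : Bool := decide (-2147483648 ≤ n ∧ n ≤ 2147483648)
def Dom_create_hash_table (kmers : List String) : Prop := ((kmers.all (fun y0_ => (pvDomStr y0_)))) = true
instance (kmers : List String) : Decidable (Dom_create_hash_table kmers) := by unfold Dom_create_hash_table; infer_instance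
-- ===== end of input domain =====

-- B uses a different algorithm: it records each key's first stream position by overwriting a dict
-- across the REVERSED prefix/suffix stream, then sorts the distinct keys by first position (alternative, same result).

-- ===== PORT A =====
-- A: one pass with a dict and an inline counter, inserting each kmer's prefix (j=0) and suffix (j=1) if unseen.
def create_hash_table (kmers : List String) : List (String × Int) :=
  (kmers.foldl (fun (st : PySem.Dict String Int × Int) kmer =>
      (PySem.List.pyRange 0 2 1).foldl (fun st j =>
        let key := PySem.Str.slice kmer (some j) (some ((PySem.Str.len kmer) - 1 + j))
        if st.1.contains key then st else (st.1.insert key st.2, st.2 + 1)) st)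
    (PySem.Dict.empty, 0)).1.items

-- ===== PORT B =====
-- B: stream of prefix/suffix keys; dict comprehension over the REVERSED enumerated stream
-- (last write wins, so each key keeps its FIRST position); sort keys by that position, enumerate.
-- 'first[k]' is ported as 'getD k 0' — every key sorted is a key of the dict, so the default is never used.
def create_hash_table_alt (kmers : List String) : List (String × Int) :=
  let stream := kmers.flatMap (fun kmer =>
    [PySem.Str.slice kmer none (some (-1)), PySem.Str.slice kmer (some 1) none])
  let first := (PySem.List.enumerate stream 0).reverse.foldl
    (fun (d : PySem.Dict String Int) p => d.insert p.2 p.1) PySem.Dict.empty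
  (PySem.List.enumerate
      (PySem.List.sorted first.keys (fun k => first.getD k 0) false) 0).map
    (fun p => (p.2, p.1))

-- ===== PRECONDITION & SPEC =====
def Spec_create_hash_table (kmers : List String) (out : List (String × Int)) : Prop := out = create_hash_table_alt kmers
instance (kmers : List String) (out : List (String × Int)) : Decidable (Spec_create_hash_table kmers out) := by unfold Spec_create_hash_table; infer_instance

-- ===== CLAIM (what is proved, stated in full; the proofs are below) =====
def Claim_equal_create_hash_table : Prop := ∀ (kmers : List String), Dom_create_hash_table kmers → Spec_create_hash_table kmers (create_hash_table kmers)

-- ===== LEMMAS AND PROOFS =====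

-- A's j=0 key kmer[0:len-1] equals B's prefix kmer[:-1]
theorem keyA_zero (s : String) :
    PySem.Str.slice s (some 0) (some ((PySem.Str.len s) - 1 + 0)) =
    PySem.Str.slice s none (some (-1)) := by
  apply String.ext
  show (PySem.Str.slice _ _ _).toList = (PySem.Str.slice _ _ _).toList
  rw [PySem.Str.toList_slice, PySem.Str.toList_slice]
  simp only [PySem.Chars.slice_eq_listSlice]
  rw [PySem.List.slice_zero_start]
  rcases h : s.toList.length with _ | k
  · have : PySem.Str.len s - 1 + 0 = (-1 : Int) := by simp [PySem.Str.len, h]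
    rw [this]
  · have : PySem.Str.len s - 1 + 0 = ((k : Nat) : Int) := by
      simp [PySem.Str.len, h]
    rw [this, PySem.List.slice_to_natCast, PySem.List.slice_to_neg_one,
        List.dropLast_eq_take, h]
    simp

-- A's j=1 key kmer[1:len] equals B's suffix kmer[1:]
theorem keyA_one (s : String) :
    PySem.Str.slice s (some 1) (some ((PySem.Str.len s) - 1 + 1)) =
    PySem.Str.slice s (some 1) none := by
  apply String.ext
  show (PySem.Str.slice _ _ _).toList = (PySem.Str.slice _ _ _).toList
  rw [PySem.Str.toList_slice, PySem.Str.toList_slice]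
  simp only [PySem.Chars.slice_eq_listSlice]
  have h1 : PySem.Str.len s - 1 + 1 = ((s.toList.length : Nat) : Int) := by
    simp [PySem.Str.len]
  have h2 : (1 : Int) = ((1 : Nat) : Int) := rfl
  rw [h1, h2, PySem.List.slice_natCast, PySem.List.slice_from_natCast]
  exact List.take_of_length_le (by simp)

-- the invariant linking A's dict to the first-seen dedup of the key stream
def CtInv (d : PySem.Dict String Int) (L : PySem.Set String) : Prop :=
  d.items = (PySem.List.enumerate L 0).map (fun p => (p.2, p.1))

theorem keys_of_inv (d : PySem.Dict String Int) (L : PySem.Set String) (h : CtInv d L) :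
    d.keys = L := by
  unfold CtInv at h
  simp only [PySem.Dict.keys, h, List.map_map]
  exact PySem.List.map_snd_enumerate (xs := L) (s := 0)

theorem step_inv (d : PySem.Dict String Int) (L : PySem.Set String) (k : String)
    (h : CtInv d L) :
    CtInv (if d.contains k then (d, (L.length : Int)) else (d.insert k (L.length : Int), (L.length : Int) + 1)).1
        (PySem.Set.add L k) ∧
    (if d.contains k then (d, (L.length : Int)) else (d.insert k (L.length : Int), (L.length : Int) + 1)).2
      = ((PySem.Set.add L k).length : Int) := by
  have hk := keys_of_inv d L h
  by_cases hm : k ∈ L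
  · have hc : d.contains k = true := by
      rw [PySem.Dict.contains_iff_mem_keys, hk]; exact hm
    simp [hc, PySem.Set.add_of_mem hm, h]
  · have hc : d.contains k = false := by
      rw [Bool.eq_false_iff, Ne, PySem.Dict.contains_iff_mem_keys, hk]; exact hm
    simp only [hc, Bool.false_eq_true, ite_false]
    constructor
    · show (d.insert k _).items = _
      unfold CtInv at h
      rw [PySem.Dict.items_insert_of_not_contains _ _ hc, h,
          PySem.Set.add_of_not_mem hm, PySem.List.enumerate_append]
      simp [PySem.List.enumerate]
    · rw [PySem.Set.add_of_not_mem hm]; simp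

theorem main_inv (kmers : List String) (d : PySem.Dict String Int) (L : PySem.Set String)
    (h : CtInv d L) :
    (kmers.foldl (fun (st : PySem.Dict String Int × Int) kmer =>
        (PySem.List.pyRange 0 2 1).foldl (fun st j =>
          let key := PySem.Str.slice kmer (some j) (some ((PySem.Str.len kmer) - 1 + j))
          if st.1.contains key then st else (st.1.insert key st.2, st.2 + 1)) st)
      (d, (L.length : Int))).1.items
    = (PySem.List.enumerate
        (kmers.foldl (fun (s : PySem.Set String) kmer =>
          PySem.Set.add (PySem.Set.add s (PySem.Str.slice kmer none (some (-1))))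
            (PySem.Str.slice kmer (some 1) none)) L) 0).map (fun p => (p.2, p.1)) := by
  induction kmers generalizing d L with
  | nil => exact h
  | cons kmer rest ih =>
    rw [List.foldl_cons, List.foldl_cons]
    have hrange : PySem.List.pyRange 0 2 1 = [(0 : Int), 1] := by decide
    rw [hrange, List.foldl_cons, List.foldl_cons, List.foldl_nil]
    simp only [keyA_zero, keyA_one]
    set k0 := PySem.Str.slice kmer none (some (-1)) with hk0
    set k1 := PySem.Str.slice kmer (some 1) none with hk1
    obtain ⟨h1, h2⟩ := step_inv d L k0 h
    set st1 := if d.contains k0 then (d, (L.length : Int)) else (d.insert k0 (L.length : Int), (L.length : Int) + 1) with hst1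
    have hpair : st1 = (st1.1, ((PySem.Set.add L k0).length : Int)) := by
      rw [← h2]
    rw [hpair]
    obtain ⟨h1', h2'⟩ := step_inv st1.1 (PySem.Set.add L k0) k1 h1
    set st2 := if st1.1.contains k1 then (st1.1, ((PySem.Set.add L k0).length : Int)) else (st1.1.insert k1 ((PySem.Set.add L k0).length : Int), ((PySem.Set.add L k0).length : Int) + 1) with hst2
    have hpair2 : st2 = (st2.1, ((PySem.Set.add (PySem.Set.add L k0) k1).length : Int)) := by
      rw [← h2']
    rw [hpair2]
    exact ih st2.1 _ h1'

-- set(xs) built from a two-key-per-kmer stream is the nested add fold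
theorem ofList_flatMap_pair {α : Type} [BEq α] (f g : α → α) (xs : List α) (s : PySem.Set α) :
    (xs.flatMap (fun k => [f k, g k])).foldl PySem.Set.add s
      = xs.foldl (fun s k => PySem.Set.add (PySem.Set.add s (f k)) (g k)) s := by
  induction xs generalizing s with
  | nil => rfl
  | cons x xs ih => simp [List.flatMap_cons, ih]

-- first occurrence of a fresh element appended on the right
theorem idxOf_append_self (l : List String) (a : String) (h : a ∉ l) :
    (l ++ [a]).idxOf a = l.length := by
  induction l with
  | nil => simp
  | cons x xs ih =>
    simp only [List.mem_cons, not_or] at h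
    simp [h.1, ih h.2, Ne.symm]

-- B's reversed-overwrite dict: each key maps to its FIRST position in xs
theorem revfold_get? (xs : List String) (d : PySem.Dict String Int) (k : String) :
    ((PySem.List.enumerate xs 0).reverse.foldl
        (fun (d : PySem.Dict String Int) p => d.insert p.2 p.1) d).get? k
      = if k ∈ xs then some ((xs.idxOf k : Nat) : Int) else d.get? k := by
  induction xs using List.reverseRecOn generalizing d with
  | nil => simp [PySem.List.enumerate]
  | append_singleton xs x ih =>
    rw [PySem.List.enumerate_append]
    simp only [PySem.List.enumerate_cons, PySem.List.enumerate_nil,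
      List.reverse_append, List.reverse_cons, List.reverse_nil, List.nil_append,
      List.singleton_append, List.foldl_cons]
    rw [ih]
    by_cases hm : k ∈ xs
    · simp [hm, List.idxOf_append_of_mem hm]
    · by_cases hx : k = x
      · subst hx
        simp [hm, PySem.Dict.get?_insert_self, idxOf_append_self xs k hm]
      · have hne : k ∉ xs ++ [x] := by simp [hm, hx]
        simp only [hm, hne, if_false]
        exact PySem.Dict.get?_insert_of_ne d _ hx

-- B's dict keys are the distinct stream elements (in reverse-first-seen order)
theorem revfold_keys (xs : List String) :
    ((PySem.List.enumerate xs 0).reverse.foldl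
        (fun (d : PySem.Dict String Int) p => d.insert p.2 p.1) PySem.Dict.empty).keys
      = PySem.Set.ofList xs.reverse := by
  have h := PySem.Dict.keys_foldl_insert_key (ν := Int)
    ((PySem.List.enumerate xs 0).reverse) (fun p => p.2) (fun _ p => p.1) PySem.Dict.empty
  rw [h, List.map_reverse, PySem.List.map_snd_enumerate]
  rfl

-- the first-seen dedup is strictly increasing in first-occurrence position
theorem ofList_pairwise_idxOf (xs : List String) :
    (PySem.Set.ofList xs).Pairwise (fun a b => xs.idxOf a < xs.idxOf b) := by
  induction xs using List.reverseRecOn with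
  | nil => simp [PySem.Set.ofList]
  | append_singleton xs x ih =>
    rw [PySem.Set.ofList_eq_foldl, List.foldl_append, ← PySem.Set.ofList_eq_foldl]
    simp only [List.foldl_cons, List.foldl_nil]
    by_cases hm : x ∈ xs
    · rw [PySem.Set.add_of_mem ((PySem.Set.mem_ofList xs x).mpr hm)]
      refine List.Pairwise.imp_of_mem (fun {a b} ha hb r => ?_) ih
      rw [List.idxOf_append_of_mem ((PySem.Set.mem_ofList xs a).mp ha),
          List.idxOf_append_of_mem ((PySem.Set.mem_ofList xs b).mp hb)]
      exact r
    · rw [PySem.Set.add_of_not_mem (fun h => hm ((PySem.Set.mem_ofList xs x).mp h))]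
      rw [List.pairwise_append]
      refine ⟨?_, List.pairwise_singleton _ _, ?_⟩
      · refine List.Pairwise.imp_of_mem (fun {a b} ha hb r => ?_) ih
        rw [List.idxOf_append_of_mem ((PySem.Set.mem_ofList xs a).mp ha),
            List.idxOf_append_of_mem ((PySem.Set.mem_ofList xs b).mp hb)]
        exact r
      · intro a ha b hb
        rw [List.mem_singleton] at hb; subst hb
        have haxs := (PySem.Set.mem_ofList xs a).mp ha
        rw [List.idxOf_append_of_mem haxs, idxOf_append_self xs b hm]
        exact List.idxOf_lt_length_of_mem haxs

-- sorting B's keys by first position recovers the first-seen dedup order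
theorem sorted_first_eq (xs : List String) :
    PySem.List.sorted
      ((PySem.List.enumerate xs 0).reverse.foldl
          (fun (d : PySem.Dict String Int) p => d.insert p.2 p.1) PySem.Dict.empty).keys
      (fun k => ((PySem.List.enumerate xs 0).reverse.foldl
          (fun (d : PySem.Dict String Int) p => d.insert p.2 p.1) PySem.Dict.empty).getD k 0)
      false
    = PySem.Set.ofList xs := by
  rw [revfold_keys]
  apply PySem.List.sorted_eq_of_perm_of_pairwise_lt
  · refine (List.perm_ext_iff_of_nodup (PySem.Set.nodup_ofList xs) (PySem.Set.nodup_ofList xs.reverse)).mpr ?_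
    intro a
    rw [PySem.Set.mem_ofList, PySem.Set.mem_ofList, List.mem_reverse]
  · refine List.Pairwise.imp_of_mem (fun {a b} ha hb r => ?_) (ofList_pairwise_idxOf xs)
    have gva : _ = _ := PySem.Dict.getD_eq_get?_getD
      ((PySem.List.enumerate xs 0).reverse.foldl
        (fun (d : PySem.Dict String Int) p => d.insert p.2 p.1) PySem.Dict.empty) a 0
    have gvb : _ = _ := PySem.Dict.getD_eq_get?_getD
      ((PySem.List.enumerate xs 0).reverse.foldl
        (fun (d : PySem.Dict String Int) p => d.insert p.2 p.1) PySem.Dict.empty) b 0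
    rw [gva, gvb, revfold_get?, revfold_get?]
    have hma := (PySem.Set.mem_ofList xs a).mp ha
    have hmb := (PySem.Set.mem_ofList xs b).mp hb
    simp only [hma, hmb, if_true, Option.getD_some]
    exact_mod_cast r

-- ===== VERDICT (by name: the statement is the Claim_ definition above) =====
theorem create_hash_table_spec : Claim_equal_create_hash_table := by
  intro kmers _
  unfold Spec_create_hash_table create_hash_table create_hash_table_alt
  show _ = (PySem.List.enumerate (PySem.List.sorted _ _ false) 0).map _
  rw [sorted_first_eq]
  rw [PySem.Set.ofList_eq_foldl, ofList_flatMap_pair]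
  have h0 : ((PySem.Set.empty : PySem.Set String).length : Int) = (0 : Int) := rfl
  have := main_inv kmers PySem.Dict.empty PySem.Set.empty rfl
  rw [h0] at this
  exact this
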